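-- pv_equiv track=rewrite | github.com/owais-ch/Strings | License Key Formatting.py | ReFormatString
-- ===== SOURCE A (Python) =====
-- def ReFormatString(S, K):
--     S=S.replace("-","")
--     length=len(S)
--
--     string=""
--     final_string=""
--     sub_length=0
--     first_sub_length=0
--
--     if length%K!=0:
--         num_groups=length//K
--         first_sub_length=length-(num_groups*K)
--
--     for i in range(length):
--         if first_sub_length!=0:
--             if sub_length<K:
--                 string+=S[i]
--                 sub_length+=1
--             if sub_length==first_sub_length:
--                 if i+1<length:
--                     final_string=final_string+string.upper()+"-"
--                     sub_length=0
--                     string=""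
--                     first_sub_length=0
--                 else:
--                     final_string=final_string+string.upper()
--                     first_sub_length=0
--         else:
--             if sub_length<K:
--                 string+=S[i]
--                 sub_length+=1
--
--             if sub_length==K:
--                 if i+1<length:
--                     final_string=final_string+string.upper()+"-"
--                     sub_length=0
--                     string=""
--                 else:
--                     final_string=final_string+string.upper()
--
--     return final_string
-- ===== SOURCE B (Python) =====
-- def ReFormatString(S, K):
--     s = S.replace("-", "").upper()
--     groups = []
--     i = len(s)
--     while i > 0:
--         groups.append(s[max(0, i - K):i])
--         i -= K
--     return "-".join(reversed(groups))
-- ===== Notes on version B (the rewrite author's own statement) =====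
-- stated objective: simpler
-- what changed: Replaces A's forward char-by-char state machine (manual group counters and a precomputed first-group length) with one cleanup pass and right-to-left slicing into chunks joined by '-'.
-- outside the precondition, e.g. on ReFormatString('ab', -2): A returns '', B does not finish within the time limit; on ReFormatString('ab', 0): A raises ZeroDivisionError, B does not finish within the time limit
import Mathlib
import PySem

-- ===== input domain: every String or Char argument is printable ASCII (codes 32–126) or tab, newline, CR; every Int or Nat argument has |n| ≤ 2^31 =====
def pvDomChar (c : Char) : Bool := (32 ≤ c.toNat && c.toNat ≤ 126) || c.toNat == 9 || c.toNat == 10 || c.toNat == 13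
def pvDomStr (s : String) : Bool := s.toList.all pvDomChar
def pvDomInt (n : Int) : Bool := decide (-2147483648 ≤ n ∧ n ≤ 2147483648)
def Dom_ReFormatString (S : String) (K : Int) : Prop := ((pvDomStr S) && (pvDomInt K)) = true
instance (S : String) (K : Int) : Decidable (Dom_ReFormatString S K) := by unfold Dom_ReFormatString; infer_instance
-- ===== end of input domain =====

-- B replaces A's forward char-by-char state machine by right-to-left slicing into chunks plus a '-'.join (objective: simpler).


-- ===== PORT A =====
-- state = (string, final_string, sub_length, first_sub_length), exactly A's four loop variables
def pvStepA (s : List Char) (length K : Int) (acc : List Char × List Char × Int × Int) (i : Int) :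
    List Char × List Char × Int × Int :=
  let string := acc.1; let final := acc.2.1; let subl := acc.2.2.1; let fsl := acc.2.2.2
  if fsl ≠ 0 then
    -- i is always in range 0 ≤ i < length, so pyGetD is exact for S[i]
    let string := if subl < K then string ++ [PySem.List.pyGetD s i ' '] else string
    let subl := if subl < K then subl + 1 else subl
    if subl = fsl then
      if i + 1 < length then ([], final ++ PySem.Chars.upper string ++ ['-'], 0, 0)
      else (string, final ++ PySem.Chars.upper string, subl, 0)
    else (string, final, subl, fsl)
  else
    let string := if subl < K then string ++ [PySem.List.pyGetD s i ' '] else string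
    let subl := if subl < K then subl + 1 else subl
    if subl = K then
      if i + 1 < length then ([], final ++ PySem.Chars.upper string ++ ['-'], 0, fsl)
      else (string, final ++ PySem.Chars.upper string, subl, fsl)
    else (string, final, subl, fsl)

def ReFormatString (S : String) (K : Int) : String :=
  let s := PySem.Chars.replace S.toList ['-'] []
  let length : Int := s.length
  let firstSubLength : Int :=
    if PySem.Int.mod length K ≠ 0 then length - PySem.Int.floordiv length K * K else 0
  let st := (PySem.List.pyRange 0 length 1).foldl (pvStepA s length K) ([], [], 0, firstSubLength)
  String.ofList st.2.1

-- ===== PORT B =====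
-- the while loop of Source B; fuel only makes it total (with 1 ≤ K it never runs out)
def pvChunksRev (s : List Char) (K : Int) : Int → Nat → List (List Char)
  | _, 0 => []
  | i, fuel + 1 =>
    if 0 < i then PySem.List.slice s (some (max 0 (i - K))) (some i) :: pvChunksRev s K (i - K) fuel
    else []

def ReFormatString_alt (S : String) (K : Int) : String :=
  let s := PySem.Chars.upper (PySem.Chars.replace S.toList ['-'] [])
  let groups := pvChunksRev s K (s.length : Int) (s.length + 1)
  String.ofList (PySem.Chars.join ['-'] groups.reverse)

-- ===== PRECONDITION & SPEC =====
-- Pre_ excludes K ≤ 0: at K = 0 A raises ZeroDivisionError, and for K < 0 A's '' is an accident of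
-- its loop guards never firing while B's right-to-left loop does not terminate there.
def Pre_ReFormatString (S : String) (K : Int) : Prop := 1 ≤ K
instance (S : String) (K : Int) : Decidable (Pre_ReFormatString S K) := by unfold Pre_ReFormatString; infer_instance
def pvWitness_ReFormatString : String × Int := ("2-5g-3-J", 2)

def Spec_ReFormatString (S : String) (K : Int) (out : String) : Prop := out = ReFormatString_alt S K
instance (S : String) (K : Int) (out : String) : Decidable (Spec_ReFormatString S K out) := by unfold Spec_ReFormatString; infer_instance

-- ===== CLAIM =====
def Claim_equal_ReFormatString : Prop := ∀ (S : String) (K : Int), Dom_ReFormatString S K → Pre_ReFormatString S K → Spec_ReFormatString S K (ReFormatString S K)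

-- ===== LEMMAS AND PROOFS =====

-- the loop body seen from the data: each character carries the flag "this is the last index" (i+1 < length fails)
def pvStepD (K : Int) (acc : List Char × List Char × Int × Int) (cb : Char × Bool) :
    List Char × List Char × Int × Int :=
  let string := acc.1; let final := acc.2.1; let subl := acc.2.2.1; let fsl := acc.2.2.2
  if fsl ≠ 0 then
    let string := if subl < K then string ++ [cb.1] else string
    let subl := if subl < K then subl + 1 else subl
    if subl = fsl then
      if cb.2 = false then ([], final ++ PySem.Chars.upper string ++ ['-'], 0, 0)
      else (string, final ++ PySem.Chars.upper string, subl, 0)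
    else (string, final, subl, fsl)
  else
    let string := if subl < K then string ++ [cb.1] else string
    let subl := if subl < K then subl + 1 else subl
    if subl = K then
      if cb.2 = false then ([], final ++ PySem.Chars.upper string ++ ['-'], 0, fsl)
      else (string, final ++ PySem.Chars.upper string, subl, fsl)
    else (string, final, subl, fsl)

def pvDec : List Char → List (Char × Bool)
  | [] => []
  | c :: t => (c, t.isEmpty) :: pvDec t

lemma pvDec_append (a b : List Char) (hb : b ≠ []) :
    pvDec (a ++ b) = a.map (fun c => (c, false)) ++ pvDec b := by
  induction a with
  | nil => simp
  | cons c a ih =>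
    have h : (a ++ b).isEmpty = false := by
      cases b with
      | nil => exact absurd rfl hb
      | cons x xs => simp
    simp [pvDec, h, ih]

lemma pvStep_eq (s : List Char) (K : Int) (st : List Char × List Char × Int × Int)
    (j : Nat) (hj : j < s.length) :
    pvStepA s (s.length : Int) K st (j : Int) = pvStepD K st (s[j], (s.drop (j+1)).isEmpty) := by
  have hget : PySem.List.pyGetD s (j : Int) ' ' = s[j] := by
    simp [PySem.List.pyGetD_of_nonneg, List.getElem?_eq_getElem hj]
  have hiff : ((j : Int) + 1 < (s.length : Int)) = ((s.drop (j+1)).isEmpty = false) := by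
    simp only [eq_iff_iff, List.isEmpty_eq_false_iff, ne_eq, List.drop_eq_nil_iff]
    constructor
    · intro h h2; omega
    · intro h; omega
  simp only [pvStepA, pvStepD, hget, hiff]

lemma pvBridge (s : List Char) (K : Int) :
    ∀ (j : Nat) (st : List Char × List Char × Int × Int), j ≤ s.length →
      (PySem.List.pyRange (j : Int) (s.length : Int) 1).foldl (pvStepA s (s.length : Int) K) st
        = (pvDec (s.drop j)).foldl (pvStepD K) st := by
  have main : ∀ (d j : Nat) (st : List Char × List Char × Int × Int),
      s.length - j = d → j ≤ s.length →
      (PySem.List.pyRange (j : Int) (s.length : Int) 1).foldl (pvStepA s (s.length : Int) K) st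
        = (pvDec (s.drop j)).foldl (pvStepD K) st := by
    intro d
    induction d with
    | zero =>
      intro j st hd hj
      have hj' : j = s.length := by omega
      subst hj'
      rw [PySem.List.pyRange_one_eq_nil (le_refl _), List.drop_length]
      rfl
    | succ d ih =>
      intro j st hd hj
      have hjl : j < s.length := by omega
      rw [PySem.List.pyRange_one_cons (by exact_mod_cast hjl)]
      rw [List.drop_eq_getElem_cons hjl]
      simp only [pvDec, List.foldl_cons]
      rw [pvStep_eq s K st j hjl]
      have hcast : (j : Int) + 1 = ((j + 1 : Nat) : Int) := by push_cast; ring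
      rw [hcast, ih (j+1) _ (by omega) (by omega)]
  intro j st hj
  exact main (s.length - j) j st rfl hj

-- steady run strictly inside a group (fsl = 0)
lemma pvRun0 (K : Int) (cs : List Char) :
    ∀ (str F : List Char) (subl : Int), 0 ≤ subl → subl + cs.length < K →
      (cs.map (fun c => (c, false))).foldl (pvStepD K) (str, F, subl, 0)
        = (str ++ cs, F, subl + cs.length, 0) := by
  induction cs with
  | nil => intro str F subl h0 hlt; simp
  | cons c cs ih =>
    intro str F subl h0 hlt
    simp only [List.length_cons] at hlt
    have h2 : subl < K := by omega
    have h3 : ¬ (subl + 1 = K) := by omega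
    simp only [List.map_cons, List.foldl_cons]
    have hstep : pvStepD K (str, F, subl, 0) (c, false) = (str ++ [c], F, subl + 1, 0) := by
      simp [pvStepD, h2, h3]
    rw [hstep, ih (str ++ [c]) F (subl + 1) (by omega) (by omega)]
    simp [List.append_assoc]
    omega

-- run strictly inside the first (short) group (fsl = r ≠ 0)
lemma pvRunR (K r : Int) (hr : r ≠ 0) (hrK : r ≤ K) (cs : List Char) :
    ∀ (str F : List Char) (subl : Int), 0 ≤ subl → subl + cs.length < r →
      (cs.map (fun c => (c, false))).foldl (pvStepD K) (str, F, subl, r)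
        = (str ++ cs, F, subl + cs.length, r) := by
  induction cs with
  | nil => intro str F subl h0 hlt; simp
  | cons c cs ih =>
    intro str F subl h0 hlt
    simp only [List.length_cons] at hlt
    have h2 : subl < K := by omega
    have h3 : ¬ (subl + 1 = r) := by omega
    simp only [List.map_cons, List.foldl_cons]
    have hstep : pvStepD K (str, F, subl, r) (c, false) = (str ++ [c], F, subl + 1, r) := by
      simp [pvStepD, h2, h3, hr]
    rw [hstep, ih (str ++ [c]) F (subl + 1) (by omega) (by omega)]
    simp [List.append_assoc]
    omega

-- steady full group, more input follows
lemma pvGroup0 (K : Int) (hK : 1 ≤ K) (c F : List Char) (hc : (c.length : Int) = K) :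
    (c.map (fun c => (c, false))).foldl (pvStepD K) ([], F, 0, 0)
      = ([], F ++ PySem.Chars.upper c ++ ['-'], 0, 0) := by
  rcases List.eq_nil_or_concat c with h | ⟨c', d, rfl⟩
  · subst h; simp at hc; omega
  · simp only [List.concat_eq_append, List.length_append, List.length_cons, List.length_nil] at hc
    simp only [List.concat_eq_append, List.map_append, List.foldl_append]
    rw [pvRun0 K c' [] F 0 le_rfl (by omega)]
    have h2 : (c'.length : Int) < K := by omega
    have h3 : (c'.length : Int) + 1 = K := by omega
    simp [pvStepD, h2, h3]

-- steady full group at the very end of the string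
lemma pvGroup0Last (K : Int) (hK : 1 ≤ K) (c F : List Char) (hc : (c.length : Int) = K) :
    (pvDec c).foldl (pvStepD K) ([], F, 0, 0) = (c, F ++ PySem.Chars.upper c, K, 0) := by
  rcases List.eq_nil_or_concat c with h | ⟨c', d, rfl⟩
  · subst h; simp at hc; omega
  · simp only [List.concat_eq_append, List.length_append, List.length_cons, List.length_nil] at hc
    simp only [List.concat_eq_append]
    rw [pvDec_append c' [d] (by simp), List.foldl_append]
    rw [pvRun0 K c' [] F 0 le_rfl (by omega)]
    have h2 : (c'.length : Int) < K := by omega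
    have h3 : (c'.length : Int) + 1 = K := by omega
    simp [pvDec, pvStepD, h2, h3]

-- first (short) group, more input follows
lemma pvGroupR (K r : Int) (c F : List Char) (hc : (c.length : Int) = r) (h1 : 1 ≤ r) (hrK : r ≤ K) :
    (c.map (fun c => (c, false))).foldl (pvStepD K) ([], F, 0, r)
      = ([], F ++ PySem.Chars.upper c ++ ['-'], 0, 0) := by
  rcases List.eq_nil_or_concat c with h | ⟨c', d, rfl⟩
  · subst h; simp at hc; omega
  · simp only [List.concat_eq_append, List.length_append, List.length_cons, List.length_nil] at hc
    simp only [List.concat_eq_append, List.map_append, List.foldl_append]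
    rw [pvRunR K r (by omega) hrK c' [] F 0 le_rfl (by omega)]
    have h2 : (c'.length : Int) < K := by omega
    have h3 : (c'.length : Int) + 1 = r := by omega
    simp [pvStepD, h2, h3, show r ≠ 0 by omega]

-- first (short) group is the whole string
lemma pvGroupRLast (K r : Int) (c F : List Char) (hc : (c.length : Int) = r) (h1 : 1 ≤ r) (hrK : r ≤ K) :
    (pvDec c).foldl (pvStepD K) ([], F, 0, r) = (c, F ++ PySem.Chars.upper c, r, 0) := by
  rcases List.eq_nil_or_concat c with h | ⟨c', d, rfl⟩
  · subst h; simp at hc; omega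
  · simp only [List.concat_eq_append, List.length_append, List.length_cons, List.length_nil] at hc
    simp only [List.concat_eq_append]
    rw [pvDec_append c' [d] (by simp), List.foldl_append]
    rw [pvRunR K r (by omega) hrK c' [] F 0 le_rfl (by omega)]
    have h2 : (c'.length : Int) < K := by omega
    have h3 : (c'.length : Int) + 1 = r := by omega
    simp [pvDec, pvStepD, h2, h3, show r ≠ 0 by omega]

-- the chunks only look at the first i characters
lemma pvChunksRev_prefix (x y : List Char) (K : Int) (hK : 1 ≤ K) :
    ∀ (f : Nat) (i : Int), i ≤ (x.length : Int) →
      pvChunksRev (x ++ y) K i f = pvChunksRev x K i f := by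
  intro f
  induction f with
  | zero => intro i hi; rfl
  | succ f ih =>
    intro i hi
    simp only [pvChunksRev]
    by_cases hi0 : 0 < i
    · rw [if_pos hi0, if_pos hi0, ih (i - K) (by omega)]
      have ha : (0 : Int) ≤ max 0 (i - K) := le_max_left _ _
      have hslice : PySem.List.slice (x ++ y) (some (max 0 (i - K))) (some i)
          = PySem.List.slice x (some (max 0 (i - K))) (some i) := by
        rw [PySem.List.slice_toNat _ ha (by omega), PySem.List.slice_toNat _ ha (by omega)]
        have h1 : (max 0 (i - K)).toNat ≤ x.length := by omega
        rw [List.drop_append]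
        have h2 : (max 0 (i - K)).toNat - x.length = 0 := by omega
        rw [h2, List.drop_zero, List.take_append]
        have h3 : i.toNat - (max 0 (i - K)).toNat - (x.drop (max 0 (i - K)).toNat).length = 0 := by
          simp [List.length_drop]; omega
        rw [h3, List.take_zero, List.append_nil]
      rw [hslice]
    · rw [if_neg hi0, if_neg hi0]

-- uppercasing commutes with chunking
lemma pvChunksRev_upper (s : List Char) (K : Int) :
    ∀ (f : Nat) (i : Int),
      pvChunksRev (PySem.Chars.upper s) K i f = (pvChunksRev s K i f).map PySem.Chars.upper := by
  intro f
  induction f with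
  | zero => intro i; rfl
  | succ f ih =>
    intro i
    simp only [pvChunksRev]
    by_cases hi : 0 < i
    · rw [if_pos hi, if_pos hi, List.map_cons, ih (i - K)]
      have ha : (0 : Int) ≤ max 0 (i - K) := le_max_left _ _
      rw [PySem.List.slice_toNat _ ha (by omega), PySem.List.slice_toNat _ ha (by omega)]
      simp [PySem.Chars.upper, List.map_take, List.map_drop]
    · rw [if_neg hi, if_neg hi]; rfl

lemma pvJoin_cons_ne_nil (sep a : List Char) (L : List (List Char)) (h : L ≠ []) :
    PySem.Chars.join sep (a :: L) = a ++ sep ++ PySem.Chars.join sep L := by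
  cases L with
  | nil => exact absurd rfl h
  | cons b L => rw [PySem.Chars.join_cons_cons]

lemma pvChunksRev_ne_nil (s : List Char) (K : Int) (i : Int) (f : Nat) (hi : 0 < i) (hf : 0 < f) :
    pvChunksRev s K i f ≠ [] := by
  cases f with
  | zero => omega
  | succ f => simp only [pvChunksRev, if_pos hi]; simp

-- peel the leftmost (short or full) group off the chunk list
lemma pvChunksRev_peel (K : Int) (hK : 1 ≤ K) :
    ∀ (m : Nat) (c t : List Char) (fuel f' : Nat), c ≠ [] → (c.length : Int) ≤ K →
      t.length = m * K.toNat → m + 1 ≤ fuel → m + 1 ≤ f' →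
      pvChunksRev (c ++ t) K ((c.length : Int) + (t.length : Int)) fuel
        = pvChunksRev t K (t.length : Int) f' ++ [c] := by
  intro m
  induction m with
  | zero =>
    intro c t fuel f' hc hcK ht hfuel hf'
    have ht0 : t = [] := List.eq_nil_of_length_eq_zero (by omega)
    subst ht0
    have hc0 : 0 < c.length := List.length_pos_iff.mpr hc
    cases fuel with
    | zero => omega
    | succ fuel =>
      simp only [List.append_nil, List.length_nil, Nat.cast_zero, add_zero]
      simp only [pvChunksRev]
      rw [if_pos (by exact_mod_cast hc0)]
      have hmax : max 0 ((c.length : Int) - K) = 0 := by omega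
      rw [hmax]
      have hslice : PySem.List.slice c (some 0) (some (c.length : Int)) = c := by
        rw [PySem.List.slice_toNat _ le_rfl (by positivity)]
        simp
      rw [hslice]
      have htail : pvChunksRev c K ((c.length : Int) - K) fuel = [] := by
        cases fuel with
        | zero => rfl
        | succ fuel => simp only [pvChunksRev]; rw [if_neg (by omega)]
      rw [htail]
      cases f' with
      | zero => omega
      | succ f' => simp [pvChunksRev]
  | succ m ih =>
    intro c t fuel f' hc hcK ht hfuel hf'
    have hK1 : 1 ≤ K.toNat := by omega
    have hexp : (m+1) * K.toNat = m * K.toNat + K.toNat := by ring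
    have hmk : m * K.toNat ≤ t.length := by omega
    have ht0 : 0 < t.length := by omega
    have hc0 : 0 < c.length := List.length_pos_iff.mpr hc
    -- split t into u ++ v with |u| = m*K, |v| = K
    set u := t.take (m * K.toNat) with hu
    set v := t.drop (m * K.toNat) with hv
    have htuv : t = u ++ v := (List.take_append_drop _ t).symm
    have hul : u.length = m * K.toNat := by
      rw [hu, List.length_take]; omega
    have hvl : v.length = K.toNat := by
      rw [hv, List.length_drop]; omega
    cases fuel with
    | zero => omega
    | succ fuel =>
      cases f' with
      | zero => omega
      | succ f' =>
        simp only [pvChunksRev]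
        rw [if_pos (by exact_mod_cast Nat.add_pos_left hc0 _ : (0:Int) < (c.length:Int) + (t.length:Int))]
        rw [if_pos (by exact_mod_cast ht0 : (0:Int) < (t.length:Int))]
        have hiK : (c.length : Int) + (t.length : Int) - K = ((c.length + u.length : Nat) : Int) := by
          push_cast
          have : (t.length : Int) = (u.length : Int) + (v.length : Int) := by
            rw [htuv]; push_cast [List.length_append]; ring
          rw [this]
          have : (v.length : Int) = K := by rw [hvl]; omega
          omega
        have htK : (t.length : Int) - K = ((u.length : Nat) : Int) := by
          have : (t.length : Int) = (u.length : Int) + (v.length : Int) := by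
            rw [htuv]; push_cast [List.length_append]; ring
          rw [this]
          have : (v.length : Int) = K := by rw [hvl]; omega
          omega
        -- heads are both v
        have hhead1 : PySem.List.slice (c ++ t) (some (max 0 ((c.length : Int) + (t.length : Int) - K)))
            (some ((c.length : Int) + (t.length : Int))) = v := by
          rw [hiK]
          have hmax : max 0 ((c.length + u.length : Nat) : Int) = ((c.length + u.length : Nat) : Int) := by
            omega
          rw [hmax, PySem.List.slice_toNat _ (by positivity) (by positivity)]
          have h1 : ((c.length : Int) + (t.length : Int)).toNat = c.length + t.length := by omega
          have h2 : (((c.length + u.length : Nat) : Int)).toNat = c.length + u.length := by omega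
          rw [h1, h2, htuv, ← List.append_assoc]
          have h3 : c.length + u.length = (c ++ u).length := by simp
          rw [h3, List.drop_left]
          have h4 : c.length + (u ++ v).length - (c ++ u).length = v.length := by
            simp only [List.length_append]; omega
          rw [h4, List.take_length]
        have hhead2 : PySem.List.slice t (some (max 0 ((t.length : Int) - K)))
            (some (t.length : Int)) = v := by
          rw [htK]
          have hmax : max 0 ((u.length : Nat) : Int) = ((u.length : Nat) : Int) := by omega
          rw [hmax, PySem.List.slice_toNat _ (by positivity) (by positivity)]
          have h1 : ((t.length : Nat) : Int).toNat = t.length := by omega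
          have h2 : (((u.length : Nat) : Int)).toNat = u.length := by omega
          rw [h1, h2, htuv, List.drop_left]
          have h4 : (u ++ v).length - u.length = v.length := by
            simp only [List.length_append]; omega
          rw [h4, List.take_length]
        rw [hhead1, hhead2]
        -- tails
        have htail1 : pvChunksRev (c ++ t) K ((c.length : Int) + (t.length : Int) - K) fuel
            = pvChunksRev u K ((u.length : Nat) : Int) f' ++ [c] := by
          rw [hiK]
          have hsplit : c ++ t = (c ++ u) ++ v := by rw [htuv, List.append_assoc]
          rw [hsplit]
          have hpre : ((c.length + u.length : Nat) : Int) ≤ ((c ++ u).length : Int) := by simp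
          rw [pvChunksRev_prefix (c ++ u) v K hK fuel _ hpre]
          have : ((c.length + u.length : Nat) : Int) = (c.length : Int) + (u.length : Int) := by push_cast; ring
          rw [this]
          exact ih c u fuel f' hc hcK hul (by omega) (by omega)
        have htail2 : pvChunksRev t K ((t.length : Int) - K) f'
            = pvChunksRev u K ((u.length : Nat) : Int) f' := by
          rw [htK, htuv]
          exact pvChunksRev_prefix u v K hK f' _ (by simp)
        rw [htail1, htail2, List.cons_append]

-- steady phase: a string whose length is a multiple of K, starting fresh with accumulated output F
lemma pvSteady (K : Int) (hK : 1 ≤ K) :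
    ∀ (n : Nat) (t : List Char) (F : List Char), t.length = n → K.toNat ∣ n →
      ((pvDec t).foldl (pvStepD K) ([], F, 0, 0)).2.1
        = F ++ PySem.Chars.join ['-'] ((pvChunksRev t K (t.length : Int) (t.length + 1)).reverse.map PySem.Chars.upper) := by
  intro n
  induction n using Nat.strong_induction_on with
  | _ n ih
  intro t F hlen hdvd
  rcases eq_or_ne t [] with ht | ht
  · subst ht
    simp [pvDec, pvChunksRev, PySem.Chars.join, List.intercalate]
  · have hn0 : 0 < n := by
      rcases Nat.eq_zero_or_pos n with h | h
      · exact absurd (List.eq_nil_of_length_eq_zero (by omega)) ht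
      · exact h
    have hK1 : 1 ≤ K.toNat := by omega
    have hkn : K.toNat ≤ n := Nat.le_of_dvd hn0 hdvd
    set c := t.take K.toNat with hcdef
    set t' := t.drop K.toNat with ht'def
    have htct : t = c ++ t' := (List.take_append_drop _ t).symm
    have hcl : c.length = K.toNat := by rw [hcdef, List.length_take]; omega
    have hclK : (c.length : Int) = K := by rw [hcl]; omega
    have ht'l : t'.length = n - K.toNat := by rw [ht'def, List.length_drop, hlen]
    have hdvd' : K.toNat ∣ (n - K.toNat) := Nat.dvd_sub hdvd dvd_rfl
    have hcne : c ≠ [] := by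
      intro h; rw [h] at hcl; simp at hcl; omega
    rcases eq_or_ne t' [] with ht'e | ht'e
    · -- t is exactly one group
      have htc : t = c := by rw [htct, ht'e, List.append_nil]
      rw [htc]
      rw [pvGroup0Last K hK c F hclK]
      have hpeel := pvChunksRev_peel K hK 0 c [] (c.length + 1) 1 hcne (by omega) (by simp) (by omega) (by omega)
      simp only [List.append_nil, List.length_nil, Nat.cast_zero, add_zero] at hpeel
      have hnil : pvChunksRev [] K 0 1 = [] := by simp [pvChunksRev]
      rw [hnil] at hpeel
      simp [hpeel, PySem.Chars.join_singleton]
    · -- a full group then the rest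
      have ht'0 : 0 < t'.length := List.length_pos_iff.mpr ht'e
      rw [htct, pvDec_append c t' ht'e, List.foldl_append]
      rw [pvGroup0 K hK c F hclK]
      rw [ih (n - K.toNat) (by omega) t' (F ++ PySem.Chars.upper c ++ ['-']) ht'l hdvd']
      obtain ⟨m, hm⟩ := hdvd'
      have hm' : t'.length = m * K.toNat := by rw [ht'l, hm, Nat.mul_comm]
      have hmle : m ≤ m * K.toNat := Nat.le_mul_of_pos_right _ (by omega)
      have hpeel := pvChunksRev_peel K hK m c t' ((c ++ t').length + 1) (t'.length + 1) hcne (by omega)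
        hm' (by simp only [List.length_append]; omega) (by omega)
      have hlen2 : (((c ++ t').length : Nat) : Int) = (c.length : Int) + (t'.length : Int) := by
        simp [List.length_append]
      rw [show pvChunksRev (c ++ t') K (((c ++ t').length : Nat) : Int) ((c ++ t').length + 1)
            = pvChunksRev t' K ((t'.length : Nat) : Int) (t'.length + 1) ++ [c] from by
          rw [hlen2]; exact hpeel]
      simp only [List.reverse_append, List.reverse_cons, List.reverse_nil, List.nil_append,
        List.singleton_append, List.map_cons]
      rw [pvJoin_cons_ne_nil ['-'] (PySem.Chars.upper c) _ (by
        intro h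
        apply pvChunksRev_ne_nil t' K ((t'.length : Nat) : Int) (t'.length + 1)
          (by exact_mod_cast ht'0) (by omega)
        have hh := congrArg List.length h
        simp only [List.length_map, List.length_reverse, List.length_nil] at hh
        exact List.eq_nil_of_length_eq_zero hh)]
      simp [List.append_assoc]

-- the whole computation, on the cleaned character list
lemma pvListMain (K : Int) (hK : 1 ≤ K) (s : List Char) :
    ((PySem.List.pyRange 0 (s.length : Int) 1).foldl (pvStepA s (s.length : Int) K)
        ([], [], 0, if PySem.Int.mod (s.length : Int) K ≠ 0
          then (s.length : Int) - PySem.Int.floordiv (s.length : Int) K * K else 0)).2.1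
      = PySem.Chars.join ['-']
          (pvChunksRev (PySem.Chars.upper s) K (((PySem.Chars.upper s).length : Nat) : Int)
            ((PySem.Chars.upper s).length + 1)).reverse := by
  have hlup : (PySem.Chars.upper s).length = s.length := by simp [PySem.Chars.upper]
  have hmod : PySem.Int.mod (s.length : Int) K = (s.length : Int) % K :=
    PySem.Int.mod_eq_emod_of_pos (by omega : (0:Int) < K)
  have hdiv : PySem.Int.floordiv (s.length : Int) K = (s.length : Int) / K :=
    PySem.Int.floordiv_eq_ediv_of_pos (by omega : (0:Int) < K)
  have hfsl : (if PySem.Int.mod (s.length : Int) K ≠ 0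
      then (s.length : Int) - PySem.Int.floordiv (s.length : Int) K * K else 0)
      = (s.length : Int) % K := by
    rw [hmod, hdiv]
    split_ifs with h
    · rw [Int.emod_def]; ring
    · omega
  rw [hfsl]
  have hb := pvBridge s K 0 ([], [], 0, (s.length : Int) % K) (Nat.zero_le _)
  simp only [Nat.cast_zero, List.drop_zero] at hb
  rw [hb]
  rw [hlup, pvChunksRev_upper s K (s.length + 1) ((s.length : Nat) : Int), ← List.map_reverse]
  set r := (s.length : Int) % K with hr
  by_cases hr0 : r = 0
  · -- no short first group
    rw [hr0]
    have hdvdZ : K ∣ (s.length : Int) := Int.dvd_of_emod_eq_zero (by rw [← hr]; exact hr0)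
    have hdvd : K.toNat ∣ s.length := by
      have hKc : ((K.toNat : Nat) : Int) = K := by omega
      rw [← Int.natCast_dvd_natCast, hKc]
      exact hdvdZ
    simpa using pvSteady K hK s.length s [] rfl hdvd
  · -- short first group of length r
    have hrpos : 1 ≤ r := by
      have := Int.emod_nonneg (s.length : Int) (by omega : K ≠ 0)
      rw [← hr] at this; omega
    have hrK : r < K := by
      have := Int.emod_lt_of_pos (s.length : Int) (by omega : 0 < K)
      rw [← hr] at this; omega
    have hrn : r ≤ (s.length : Int) := by
      by_cases h : K ≤ (s.length : Int)
      · omega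
      · have h2 : (s.length : Int) % K = (s.length : Int) :=
          Int.emod_eq_of_lt (by positivity) (by omega)
        rw [← hr] at h2; omega
    set c := s.take r.toNat with hcdef
    set t := s.drop r.toNat with htdef
    have hst : s = c ++ t := (List.take_append_drop _ s).symm
    have hrt : r.toNat ≤ s.length := by omega
    have hcl : c.length = r.toNat := by rw [hcdef, List.length_take]; omega
    have hclr : (c.length : Int) = r := by rw [hcl]; omega
    have hcne : c ≠ [] := by intro h; rw [h] at hcl; simp at hcl; omega
    have htl : (t.length : Int) = (s.length : Int) - r := by
      rw [htdef, List.length_drop]; omega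
    have hZ : K ∣ ((s.length : Int) - r) := ⟨(s.length : Int) / K, by rw [hr, Int.emod_def]; ring⟩
    have hdvdt : K.toNat ∣ t.length := by
      have hKc : ((K.toNat : Nat) : Int) = K := by omega
      rw [← Int.natCast_dvd_natCast, hKc, htl]
      exact hZ
    rcases eq_or_ne t [] with hte | hte
    · -- the whole string is the single short group
      have hsc : s = c := by rw [hst, hte, List.append_nil]
      rw [hsc]
      rw [pvGroupRLast K r c [] hclr (by omega) (by omega)]
      have hpeel := pvChunksRev_peel K hK 0 c [] (c.length + 1) 1 hcne (by omega) (by simp) (by omega) (by omega)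
      simp only [List.append_nil, List.length_nil, Nat.cast_zero, add_zero] at hpeel
      have hnil : pvChunksRev [] K 0 1 = [] := by simp [pvChunksRev]
      rw [hnil] at hpeel
      simp [hpeel, PySem.Chars.join_singleton]
    · have ht0 : 0 < t.length := List.length_pos_iff.mpr hte
      rw [hst, pvDec_append c t hte, List.foldl_append]
      rw [pvGroupR K r c [] hclr (by omega) (by omega)]
      rw [pvSteady K hK t.length t ([] ++ PySem.Chars.upper c ++ ['-']) rfl hdvdt]
      obtain ⟨m, hm⟩ := hdvdt
      have hm' : t.length = m * K.toNat := by rw [hm, Nat.mul_comm]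
      have hmle : m ≤ m * K.toNat := Nat.le_mul_of_pos_right _ (by omega)
      have hpeel := pvChunksRev_peel K hK m c t ((c ++ t).length + 1) (t.length + 1) hcne (by omega)
        hm' (by simp only [List.length_append]; omega) (by omega)
      have hlen2 : (((c ++ t).length : Nat) : Int) = (c.length : Int) + (t.length : Int) := by
        simp [List.length_append]
      rw [show pvChunksRev (c ++ t) K (((c ++ t).length : Nat) : Int) ((c ++ t).length + 1)
            = pvChunksRev t K ((t.length : Nat) : Int) (t.length + 1) ++ [c] from by
          rw [hlen2]; exact hpeel]
      simp only [List.reverse_append, List.reverse_cons, List.reverse_nil, List.nil_append,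
        List.singleton_append, List.map_cons]
      rw [pvJoin_cons_ne_nil ['-'] (PySem.Chars.upper c) _ (by
        intro h
        apply pvChunksRev_ne_nil t K ((t.length : Nat) : Int) (t.length + 1)
          (by exact_mod_cast ht0) (by omega)
        have hh := congrArg List.length h
        simp only [List.length_map, List.length_reverse, List.length_nil] at hh
        exact List.eq_nil_of_length_eq_zero hh)]

-- ===== VERDICT =====
theorem ReFormatString_spec : Claim_equal_ReFormatString := by
  intro S K _ hK
  unfold Pre_ReFormatString at hK
  unfold Spec_ReFormatString ReFormatString ReFormatString_alt
  exact congrArg String.ofList (pvListMain K hK (PySem.Chars.replace S.toList ['-'] []))
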